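-- pv_equiv track=rewrite | github.com/Christian-Nunnally/wings3 | src/pipeline/transformMapsHeaderGenerator.py | flipAndInterleaveAlongXAxis
-- ===== SOURCE A (Python) =====
-- def flipAndInterleaveAlongXAxis(arr):
--     arrayFlippedAlongXAxis = arr[::-1]
--     interleaved = []
--     for originalRow, flippedRow in zip(arr, arrayFlippedAlongXAxis):
--         interleaved.append(originalRow)
--         interleaved.append(flippedRow)
--     half_length = len(interleaved) // 2
--     return interleaved[:half_length]
-- ===== SOURCE B (Python) =====
-- def flipAndInterleaveAlongXAxis(arr):
--     n = len(arr)
--     return [arr[i // 2] if i % 2 == 0 else arr[n - 1 - i // 2] for i in range(n)]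
-- ===== Notes on version B (the rewrite author's own statement) =====
-- stated objective: simpler
-- what changed: Instead of building the reversed array and a full 2n-length interleaved list and then slicing its first half, B computes each of the n kept rows directly by index (arr[i//2] for even i, arr[n-1-i//2] for odd i) in one comprehension.
import Mathlib
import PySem

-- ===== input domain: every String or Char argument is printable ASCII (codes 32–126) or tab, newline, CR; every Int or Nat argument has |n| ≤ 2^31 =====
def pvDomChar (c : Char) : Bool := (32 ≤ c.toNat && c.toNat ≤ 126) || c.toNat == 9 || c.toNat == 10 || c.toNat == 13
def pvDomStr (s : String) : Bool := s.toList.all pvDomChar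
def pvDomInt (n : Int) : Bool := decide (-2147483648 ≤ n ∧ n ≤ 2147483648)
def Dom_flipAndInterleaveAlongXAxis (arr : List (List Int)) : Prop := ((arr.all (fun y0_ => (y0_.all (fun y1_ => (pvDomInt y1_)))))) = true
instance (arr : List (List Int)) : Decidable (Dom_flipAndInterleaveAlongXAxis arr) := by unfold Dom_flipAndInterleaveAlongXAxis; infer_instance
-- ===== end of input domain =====

-- B computes the kept first half directly by an index formula, skipping the reversed
-- array and the full 2n-length interleaved intermediate list (objective: simpler).

-- ===== PORT A =====
def flipAndInterleaveAlongXAxis (arr : List (List Int)) : List (List Int) :=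
  -- arr[::-1]; slice? with step -1 never raises, .getD [] only makes the match total
  let arrayFlippedAlongXAxis := (PySem.List.slice? arr none none (-1)).getD []
  let interleaved := (arr.zip arrayFlippedAlongXAxis).foldl
    (fun acc p => acc ++ [p.1] ++ [p.2]) []
  let half_length := PySem.Int.floordiv (interleaved.length : Int) 2
  PySem.List.slice interleaved none (some half_length)

-- ===== PORT B =====
def flipAndInterleaveAlongXAxis_alt (arr : List (List Int)) : List (List Int) :=
  let n := arr.length
  (List.range n).map (fun i =>
    if i % 2 = 0 then arr.getD (i / 2) [] else arr.getD (n - 1 - i / 2) [])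

-- ===== PRECONDITION & SPEC =====
def Spec_flipAndInterleaveAlongXAxis (arr : List (List Int)) (out : List (List Int)) : Prop := out = flipAndInterleaveAlongXAxis_alt arr
instance (arr : List (List Int)) (out : List (List Int)) : Decidable (Spec_flipAndInterleaveAlongXAxis arr out) := by unfold Spec_flipAndInterleaveAlongXAxis; infer_instance

-- ===== CLAIM (what is proved, stated in full; the proofs are below) =====
def Claim_equal_flipAndInterleaveAlongXAxis : Prop := ∀ (arr : List (List Int)), Dom_flipAndInterleaveAlongXAxis arr → Spec_flipAndInterleaveAlongXAxis arr (flipAndInterleaveAlongXAxis arr)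

-- ===== LEMMAS AND PROOFS =====

-- indexing the 2-flattening: element i is the first/second component of pair i/2
theorem flat2_getElem? {α : Type} (l : List (α × α)) (i : Nat) :
    (l.flatMap fun p => [p.1, p.2])[i]? =
      l[i / 2]?.map (fun p => if i % 2 = 0 then p.1 else p.2) := by
  induction l generalizing i with
  | nil => simp
  | cons p l ih =>
    match i with
    | 0 => simp
    | 1 => simp
    | (k + 2) =>
      have h2 : (k + 2) / 2 = k / 2 + 1 := by omega
      have h3 : (k + 2) % 2 = k % 2 := by omega
      simpa [List.flatMap_cons, h2, h3] using ih k

theorem flat2_length {α : Type} (l : List (α × α)) :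
    (l.flatMap fun p => [p.1, p.2]).length = 2 * l.length := by
  induction l with
  | nil => rfl
  | cons p l ih => simp [ih]; omega

theorem zip_getElem? {α : Type} (xs ys : List α) (i : Nat) :
    (xs.zip ys)[i]? = xs[i]?.bind fun a => ys[i]?.map fun b => (a, b) := by
  simp only [List.zip, List.getElem?_zipWith]
  cases xs[i]? <;> cases ys[i]? <;> rfl

theorem flipAndInterleave_eq (arr : List (List Int)) :
    flipAndInterleaveAlongXAxis arr = flipAndInterleaveAlongXAxis_alt arr := by
  unfold flipAndInterleaveAlongXAxis flipAndInterleaveAlongXAxis_alt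
  rw [PySem.List.slice?_none_none_neg_one]
  simp only [Option.getD_some]
  rw [show (fun (acc : List (List Int)) (p : List Int × List Int) => acc ++ [p.1] ++ [p.2])
        = fun acc p => acc ++ [p.1, p.2] by funext acc p; simp,
      PySem.List.foldl_append_eq_flatMap]
  simp only [List.nil_append]
  set F := (arr.zip arr.reverse).flatMap (fun p => [p.1, p.2]) with hF
  have hlen : F.length = 2 * arr.length := by
    rw [hF, flat2_length, List.length_zip, List.length_reverse]; omega
  have hhalf : PySem.Int.floordiv (F.length : Int) 2 = (arr.length : Int) := by
    rw [hlen, PySem.Int.floordiv_eq_ediv_of_pos (by omega)]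
    omega
  rw [hhalf, PySem.List.slice_to_natCast]
  apply List.ext_getElem?
  intro i
  rw [List.getElem?_take]
  by_cases hi : i < arr.length
  · simp only [hi, if_pos]
    have hi2 : i / 2 < arr.length := by omega
    rw [hF, flat2_getElem?, zip_getElem?]
    rw [List.getElem?_reverse hi2]
    rw [List.getElem?_eq_getElem hi2, List.getElem?_eq_getElem (show arr.length - 1 - i / 2 < arr.length by omega)]
    rw [List.getElem?_map, List.getElem?_range hi]
    simp [List.getD_eq_getElem?_getD, List.getElem?_eq_getElem hi2,
      List.getElem?_eq_getElem (show arr.length - 1 - i / 2 < arr.length by omega)]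
  · simp only [hi, if_neg, not_false_iff]
    rw [eq_comm, List.getElem?_eq_none_iff]
    simpa using by omega

-- ===== VERDICT (by name: the statement is the Claim_ definition above) =====
theorem flipAndInterleaveAlongXAxis_spec : Claim_equal_flipAndInterleaveAlongXAxis := by
  intro arr _
  unfold Spec_flipAndInterleaveAlongXAxis
  exact flipAndInterleave_eq arr
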